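-- pv_equiv track=rewrite | github.com/Rieg-byte/SAOD | lab1/main.py | tournamentSortMatrix
-- ===== SOURCE A (Python) =====
-- def tournamentSortMatrix(matrix):
--     def heapify(arr, n, i):
--             largest = i
--             l = 2 * i + 1
--             r = 2 * i + 2
--             if l < n and arr[i] < arr[l]:
--                 largest = l
--             if r < n and arr[largest] < arr[r]:
--                 largest = r
--             if largest != i:
--                 arr[i], arr[largest] = arr[largest], arr[i]
--                 heapify(arr, n, largest)
--     def heapSort(arr):
--             n = len(arr)
--             for i in range(n, -1, -1):
--                 heapify(arr, n, i)
--             for i in range(n - 1, 0, -1):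
--                 arr[i], arr[0] = arr[0], arr[i]
--                 heapify(arr, i, 0)
--             return arr
--
--     result = []
--     for i in range(len(matrix)):
--         result.append(heapSort(matrix[i]))
--     return result
-- ===== SOURCE B (Python) =====
-- def tournamentSortMatrix(matrix):
--     # Sort each row in place with list.sort() (same mutation as A's in-place heapsort),
--     # return a fresh list holding the same (now sorted) row objects.
--     for row in matrix:
--         row.sort()
--     return list(matrix)
-- ===== Notes on version B (the rewrite author's own statement) =====
-- stated objective: idiomatic
-- what changed: Replaces the hand-written recursive heapsort (heapify + sift-down loops) per row with Python's built-in in-place list.sort per row, keeping the same in-place mutation of each row.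
import Mathlib
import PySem

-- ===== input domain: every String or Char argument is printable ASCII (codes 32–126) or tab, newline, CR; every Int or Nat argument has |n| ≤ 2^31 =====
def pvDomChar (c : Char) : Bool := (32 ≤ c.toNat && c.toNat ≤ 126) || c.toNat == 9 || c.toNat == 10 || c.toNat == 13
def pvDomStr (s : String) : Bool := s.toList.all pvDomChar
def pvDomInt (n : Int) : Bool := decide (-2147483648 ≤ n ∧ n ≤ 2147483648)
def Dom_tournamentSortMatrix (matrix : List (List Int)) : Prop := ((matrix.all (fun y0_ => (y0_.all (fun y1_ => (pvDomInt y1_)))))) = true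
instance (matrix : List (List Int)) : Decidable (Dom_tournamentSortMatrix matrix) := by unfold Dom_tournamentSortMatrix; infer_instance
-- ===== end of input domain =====

-- B replaces A's hand-written per-row heapsort with the library sort per row (B mutates each
-- row in place, exactly as A does; the equivalence proved here is about the return value).

-- ===== PORT A =====
-- `arr[i], arr[largest] = arr[largest], arr[i]` — simultaneous swap of two positions.
def swapL (a : List Int) (i j : Nat) : List Int :=
  (a.set i (a.getD j 0)).set j (a.getD i 0)

-- the value of `largest` after heapify's two comparisons.
def largestIdx (arr : List Int) (n i : Nat) : Nat :=
  let l0 := if 2*i+1 < n ∧ arr.getD i 0 < arr.getD (2*i+1) 0 then 2*i+1 else i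
  if 2*i+2 < n ∧ arr.getD l0 0 < arr.getD (2*i+2) 0 then 2*i+2 else l0

-- needed by heapifyA's termination proof, hence above the port.
theorem largestIdx_ne (arr : List Int) (n i : Nat) (h : largestIdx arr n i ≠ i) :
    (largestIdx arr n i = 2*i+1 ∨ largestIdx arr n i = 2*i+2) ∧ largestIdx arr n i < n := by
  simp only [largestIdx] at h ⊢
  split_ifs at h ⊢ <;> simp_all

-- A's recursive `heapify(arr, n, i)`.
def heapifyA (arr : List Int) (n i : Nat) : List Int :=
  let largest := largestIdx arr n i
  if h : largest ≠ i then heapifyA (swapL arr i largest) n largest else arr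
termination_by n - i
decreasing_by
  have := largestIdx_ne arr n i h
  omega

-- `for i in range(n, -1, -1): heapify(arr, n, i)` — k iterations left, current i = k-1.
def buildLoopA (n : Nat) : Nat → List Int → List Int
  | 0, a => a
  | k+1, a => buildLoopA n k (heapifyA a n k)

-- `for i in range(n-1, 0, -1): arr[i],arr[0]=arr[0],arr[i]; heapify(arr, i, 0)` — processes i = m..1.
def sortLoopA : Nat → List Int → List Int
  | 0, a => a
  | k+1, a => sortLoopA k (heapifyA (swapL a (k+1) 0) (k+1) 0)

-- A's `heapSort(arr)`.
def heapSortA (arr : List Int) : List Int :=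
  let n := arr.length
  sortLoopA (n-1) (buildLoopA n (n+1) arr)

def tournamentSortMatrix (matrix : List (List Int)) : List (List Int) :=
  matrix.foldl (fun result row => result ++ [heapSortA row]) []

-- ===== PORT B =====
-- B: `for row in matrix: row.sort()`; `return list(matrix)` — per-row library sort.
def tournamentSortMatrix_alt (matrix : List (List Int)) : List (List Int) :=
  matrix.map (fun row => PySem.List.sorted row (fun x => x) false)

-- ===== PRECONDITION & SPEC =====
def Spec_tournamentSortMatrix (matrix : List (List Int)) (out : List (List Int)) : Prop := out = tournamentSortMatrix_alt matrix
instance (matrix : List (List Int)) (out : List (List Int)) : Decidable (Spec_tournamentSortMatrix matrix out) := by unfold Spec_tournamentSortMatrix; infer_instance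

-- ===== CLAIM (what is proved, stated in full; the proofs are below) =====
def Claim_equal_tournamentSortMatrix : Prop := ∀ (matrix : List (List Int)), Dom_tournamentSortMatrix matrix → Spec_tournamentSortMatrix matrix (tournamentSortMatrix matrix)

-- ===== LEMMAS AND PROOFS =====

theorem swapL_length (a : List Int) (i j : Nat) : (swapL a i j).length = a.length := by
  simp [swapL]

theorem getD_set_ne (a : List Int) (i p : Nat) (v : Int) (h : i ≠ p) :
    (a.set i v).getD p 0 = a.getD p 0 := by
  simp [List.getD_eq_getElem?_getD, List.getElem?_set_ne h]

theorem getD_set_self (a : List Int) (i : Nat) (v : Int) (h : i < a.length) :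
    (a.set i v).getD i 0 = v := by
  simp [List.getD_eq_getElem?_getD, h]

theorem getD_swapL_of_ne (a : List Int) (i j p : Nat) (h1 : p ≠ i) (h2 : p ≠ j) :
    (swapL a i j).getD p 0 = a.getD p 0 := by
  rw [swapL, getD_set_ne _ _ _ _ (Ne.symm h2), getD_set_ne _ _ _ _ (Ne.symm h1)]

theorem getD_swapL_fst (a : List Int) (i j : Nat) (hij : i ≠ j) (hi : i < a.length) :
    (swapL a i j).getD i 0 = a.getD j 0 := by
  rw [swapL, getD_set_ne _ _ _ _ (Ne.symm hij), getD_set_self _ _ _ hi]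

theorem getD_swapL_snd (a : List Int) (i j : Nat) (hj : j < a.length) :
    (swapL a i j).getD j 0 = a.getD i 0 := by
  rw [swapL, getD_set_self]
  simpa using hj

theorem perm_getD_cons_set (t : List Int) (m : Nat) (x : Int) (hm : m < t.length) :
    (t.getD m 0 :: t.set m x).Perm (x :: t) := by
  induction t generalizing m with
  | nil => simp at hm
  | cons y u ih =>
    cases m with
    | zero => simpa using List.Perm.swap x y u
    | succ m =>
      simp only [List.getD_cons_succ, List.set_cons_succ]
      refine (List.Perm.swap y (u.getD m 0) (u.set m x)).trans ?_
      exact ((ih m (by simpa using hm)).cons y).trans (List.Perm.swap x y u)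

theorem swapL_perm (a : List Int) (i j : Nat) (hi : i < a.length) (hj : j < a.length) :
    (swapL a i j).Perm a := by
  induction a generalizing i j with
  | nil => simp at hi
  | cons x t ih =>
    cases i with
    | zero =>
      cases j with
      | zero => simp [swapL]
      | succ j =>
        simp only [swapL, List.getD_cons_succ, List.getD_cons_zero, List.set_cons_zero,
          List.set_cons_succ]
        exact perm_getD_cons_set t j x (by simpa using hj)
    | succ i =>
      cases j with
      | zero =>
        simp only [swapL, List.getD_cons_succ, List.getD_cons_zero, List.set_cons_succ,
          List.set_cons_zero]
        exact perm_getD_cons_set t i x (by simpa using hi)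
      | succ j =>
        simp only [swapL, List.getD_cons_succ, List.set_cons_succ]
        exact ((ih i j (by simpa using hi) (by simpa using hj))).cons x

theorem heapifyA_eq (arr : List Int) (n i : Nat) :
    heapifyA arr n i = if largestIdx arr n i ≠ i then
      heapifyA (swapL arr i (largestIdx arr n i)) n (largestIdx arr n i) else arr := by
  rw [heapifyA]
  simp only [dite_eq_ite]

theorem heapifyA_length (a : List Int) (n i : Nat) : (heapifyA a n i).length = a.length := by
  induction a, i using heapifyA.induct n with
  | case1 arr i largest h ih =>
    have hdef : largest = largestIdx arr n i := rfl
    rw [hdef] at h ih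
    rw [heapifyA_eq, if_pos h, ih, swapL_length]
  | case2 arr i largest h =>
    have hdef : largest = largestIdx arr n i := rfl
    rw [hdef] at h
    rw [heapifyA_eq, if_neg h]

theorem heapifyA_frame (a : List Int) (n i : Nat) :
    ∀ p, (p < 2*i+1 ∧ p ≠ i) ∨ n ≤ p → (heapifyA a n i).getD p 0 = a.getD p 0 := by
  induction a, i using heapifyA.induct n with
  | case1 arr i largest h ih =>
    have hdef : largest = largestIdx arr n i := rfl
    rw [hdef] at h ih
    intro p hp
    have hL := largestIdx_ne arr n i h
    rw [heapifyA_eq, if_pos h]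
    rw [ih p (by omega)]
    exact getD_swapL_of_ne arr i _ p (by omega) (by omega)
  | case2 arr i largest h =>
    have hdef : largest = largestIdx arr n i := rfl
    rw [hdef] at h
    intro p hp
    rw [heapifyA_eq, if_neg h]

theorem heapifyA_perm (a : List Int) (n i : Nat) :
    n ≤ a.length → (heapifyA a n i).Perm a := by
  induction a, i using heapifyA.induct n with
  | case1 arr i largest h ih =>
    have hdef : largest = largestIdx arr n i := rfl
    rw [hdef] at h ih
    intro hn
    have hL := largestIdx_ne arr n i h
    have hiL : i < largestIdx arr n i := by omega
    rw [heapifyA_eq, if_pos h]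
    exact (ih (by rw [swapL_length]; exact hn)).trans
      (swapL_perm arr i _ (by omega) (by omega))
  | case2 arr i largest h =>
    have hdef : largest = largestIdx arr n i := rfl
    rw [hdef] at h
    intro _
    rw [heapifyA_eq, if_neg h]

theorem heapifyA_values (a : List Int) (n i : Nat) :
    n ≤ a.length → ∀ p, p < n → ∃ q, q < n ∧ (heapifyA a n i).getD p 0 = a.getD q 0 := by
  induction a, i using heapifyA.induct n with
  | case1 arr i largest h ih =>
    have hdef : largest = largestIdx arr n i := rfl
    rw [hdef] at h ih
    intro hn p hp
    have hL := largestIdx_ne arr n i h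
    have hiL : i < largestIdx arr n i := by omega
    rw [heapifyA_eq, if_pos h]
    obtain ⟨q, hq, hval⟩ := ih (by rw [swapL_length]; exact hn) p hp
    by_cases hqi : q = i
    · refine ⟨largestIdx arr n i, by omega, ?_⟩
      rw [hval, hqi, getD_swapL_fst arr i _ (by omega) (by omega)]
    · by_cases hqL : q = largestIdx arr n i
      · refine ⟨i, by omega, ?_⟩
        rw [hval, hqL, getD_swapL_snd arr i _ (by omega)]
      · exact ⟨q, hq, by rw [hval, getD_swapL_of_ne arr i _ q hqi hqL]⟩
  | case2 arr i largest h =>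
    have hdef : largest = largestIdx arr n i := rfl
    rw [hdef] at h
    intro hn p hp
    rw [heapifyA_eq, if_neg h]
    exact ⟨p, hp, rfl⟩

theorem heapifyA_root (a : List Int) (n i : Nat) :
    n ≤ a.length → ∃ q, (q = i ∨ ((q = 2*i+1 ∨ q = 2*i+2) ∧ q < n)) ∧
      (heapifyA a n i).getD i 0 = a.getD q 0 := by
  induction a, i using heapifyA.induct n with
  | case1 arr i largest h _ =>
    have hdef : largest = largestIdx arr n i := rfl
    rw [hdef] at h
    intro hn
    have hL := largestIdx_ne arr n i h
    have hiL : i < largestIdx arr n i := by omega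
    rw [heapifyA_eq, if_pos h]
    refine ⟨largestIdx arr n i, Or.inr ⟨hL.1, hL.2⟩, ?_⟩
    rw [heapifyA_frame _ n _ i (by omega),
      getD_swapL_fst arr i _ (by omega) (by omega)]
  | case2 arr i largest h =>
    have hdef : largest = largestIdx arr n i := rfl
    rw [hdef] at h
    intro _
    rw [heapifyA_eq, if_neg h]
    exact ⟨i, Or.inl rfl, rfl⟩

theorem largestIdx_max (a : List Int) (n i : Nat) :
    ∀ k, (k = i ∨ ((k = 2*i+1 ∨ k = 2*i+2) ∧ k < n)) →
      a.getD k 0 ≤ a.getD (largestIdx a n i) 0 := by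
  intro k hk
  simp only [largestIdx]
  split_ifs with h1 h2 h2 <;>
    rcases hk with rfl | ⟨rfl | rfl, hkn⟩ <;>
    simp_all <;> omega

theorem heapifyA_heap (a : List Int) (n i : Nat) :
    n ≤ a.length →
    (∀ j k, i < j → k < n → (k = 2*j+1 ∨ k = 2*j+2) → a.getD k 0 ≤ a.getD j 0) →
    ∀ j k, i ≤ j → k < n → (k = 2*j+1 ∨ k = 2*j+2) →
      (heapifyA a n i).getD k 0 ≤ (heapifyA a n i).getD j 0 := by
  induction a, i using heapifyA.induct n with
  | case2 arr i largest h =>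
    have hdef : largest = largestIdx arr n i := rfl
    rw [hdef] at h
    intro hn H j k hij hk hchild
    have hLi : largestIdx arr n i = i := by simpa using h
    rw [heapifyA_eq, if_neg h]
    rcases Nat.lt_or_ge i j with hij' | hij'
    · exact H j k hij' hk hchild
    · have hji : j = i := by omega
      subst hji
      have := largestIdx_max arr n j k (Or.inr ⟨hchild, hk⟩)
      rwa [hLi] at this
  | case1 arr i largest h ih =>
    have hdef : largest = largestIdx arr n i := rfl
    rw [hdef] at h ih
    intro hn H j k hij hk hchild
    have hL := largestIdx_ne arr n i h
    have hiL : i < largestIdx arr n i := by omega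
    set L := largestIdx arr n i with hLdef
    have hLn : L < n := hL.2
    rw [heapifyA_eq, if_pos h]
    have hlen : (swapL arr i L).length = arr.length := swapL_length arr i L
    have ha'i : (swapL arr i L).getD i 0 = arr.getD L 0 :=
      getD_swapL_fst arr i L (by omega) (by omega)
    have ha'L : (swapL arr i L).getD L 0 = arr.getD i 0 :=
      getD_swapL_snd arr i L (by omega)
    have Ha' : ∀ j k, L < j → k < n → (k = 2*j+1 ∨ k = 2*j+2) →
        (swapL arr i L).getD k 0 ≤ (swapL arr i L).getD j 0 := by
      intro j k hLj hk hc
      rw [getD_swapL_of_ne arr i L j (by omega) (by omega),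
        getD_swapL_of_ne arr i L k (by omega) (by omega)]
      exact H j k (by omega) hk hc
    have IHres := ih (by omega) Ha'
    rcases Nat.lt_or_ge j L with hjL | hjL
    · rcases Nat.lt_or_ge i j with hij' | hij'
      · -- i < j < L : both positions untouched
        rw [heapifyA_frame _ n L j (by omega), heapifyA_frame _ n L k (by omega),
          getD_swapL_of_ne arr i L j (by omega) (by omega),
          getD_swapL_of_ne arr i L k (by omega) (by omega)]
        exact H j k (by omega) hk hchild
      · -- j = i
        have hji : j = i := by omega
        subst hji
        have hresj : (heapifyA (swapL arr j L) n L).getD j 0 = arr.getD L 0 := by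
          rw [heapifyA_frame _ n L j (by omega), ha'i]
        rw [hresj]
        by_cases hkL : k = L
        · subst hkL
          obtain ⟨q, hq, hval⟩ := heapifyA_root (swapL arr j L) n L (by omega)
          rw [hval]
          rcases hq with rfl | ⟨hq', hqn⟩
          · rw [ha'L]
            have := largestIdx_max arr n j j (Or.inl rfl)
            rwa [← hLdef] at this
          · rw [getD_swapL_of_ne arr j L q (by omega) (by omega)]
            exact H L q (by omega) hqn hq'
        · -- the sibling child, untouched by the recursive call
          rw [heapifyA_frame _ n L k (by omega),
            getD_swapL_of_ne arr j L k (by omega) (by omega)]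
          have := largestIdx_max arr n j k (Or.inr ⟨hchild, hk⟩)
          rwa [← hLdef] at this
    · exact IHres j k hjL hk hchild

theorem heap_root_max (a : List Int) (m : Nat)
    (H : ∀ j k, k < m → (k = 2*j+1 ∨ k = 2*j+2) → a.getD k 0 ≤ a.getD j 0) :
    ∀ p, p < m → a.getD p 0 ≤ a.getD 0 0 := by
  intro p
  induction p using Nat.strong_induction_on with
  | _ p IH =>
    intro hp
    match p with
    | 0 => exact le_refl _
    | Nat.succ p =>
      have hpar : (p+1) = 2*(p/2)+1 ∨ (p+1) = 2*(p/2)+2 := by omega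
      calc a.getD (p+1) 0 ≤ a.getD (p/2) 0 := H (p/2) (p+1) hp hpar
        _ ≤ a.getD 0 0 := IH (p/2) (by omega) (by omega)

theorem buildLoopA_length (n : Nat) : ∀ k a, (buildLoopA n k a).length = a.length := by
  intro k
  induction k with
  | zero => intro a; rfl
  | succ k ih => intro a; rw [buildLoopA, ih, heapifyA_length]

theorem buildLoopA_perm (n : Nat) : ∀ k a, n ≤ a.length → (buildLoopA n k a).Perm a := by
  intro k
  induction k with
  | zero => intro a _; exact List.Perm.refl a
  | succ k ih =>
    intro a hn
    exact (ih _ (by rw [heapifyA_length]; exact hn)).trans (heapifyA_perm a n k hn)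

theorem buildLoopA_heap (n : Nat) : ∀ k a, n ≤ a.length →
    (∀ j k', k ≤ j → k' < n → (k' = 2*j+1 ∨ k' = 2*j+2) → a.getD k' 0 ≤ a.getD j 0) →
    ∀ j k', k' < n → (k' = 2*j+1 ∨ k' = 2*j+2) →
      (buildLoopA n k a).getD k' 0 ≤ (buildLoopA n k a).getD j 0 := by
  intro k
  induction k with
  | zero =>
    intro a _ H j k' hk' hc
    exact H j k' (Nat.zero_le j) hk' hc
  | succ k ih =>
    intro a hn H
    rw [buildLoopA]
    exact ih _ (by rw [heapifyA_length]; exact hn)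
      (fun j k' hkj => heapifyA_heap a n k hn (fun j' k'' h1 => H j' k'' (by omega)) j k' hkj)

theorem sortLoopA_length : ∀ m a, (sortLoopA m a).length = a.length := by
  intro m
  induction m with
  | zero => intro a; rfl
  | succ k ih => intro a; rw [sortLoopA, ih, heapifyA_length, swapL_length]

theorem sortLoopA_perm : ∀ m a, m < a.length → (sortLoopA m a).Perm a := by
  intro m
  induction m with
  | zero => intro a _; exact List.Perm.refl a
  | succ k ih =>
    intro a hm
    have h1 : (swapL a (k+1) 0).length = a.length := swapL_length a (k+1) 0
    have h2 : (heapifyA (swapL a (k+1) 0) (k+1) 0).length = a.length := by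
      rw [heapifyA_length, h1]
    rw [sortLoopA]
    exact ((ih _ (by omega)).trans
      (heapifyA_perm _ (k+1) 0 (by omega))).trans
      (swapL_perm a (k+1) 0 (by omega) (by omega))

theorem sortLoopA_sorted : ∀ m a, m + 1 ≤ a.length →
    (∀ j k', k' < m+1 → (k' = 2*j+1 ∨ k' = 2*j+2) → a.getD k' 0 ≤ a.getD j 0) →
    (∀ p q, m+1 ≤ p → p ≤ q → q < a.length → a.getD p 0 ≤ a.getD q 0) →
    (∀ p q, p < m+1 → m+1 ≤ q → q < a.length → a.getD p 0 ≤ a.getD q 0) →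
    ∀ p q, p ≤ q → q < a.length → (sortLoopA m a).getD p 0 ≤ (sortLoopA m a).getD q 0 := by
  intro m
  induction m with
  | zero =>
    intro a _ _ Hsuf Hpart p q hpq hq
    rcases Nat.eq_or_lt_of_le hpq with rfl | hpq'
    · exact le_refl _
    · rcases Nat.eq_zero_or_pos p with rfl | hp
      · exact Hpart 0 q (by omega) (by omega) hq
      · exact Hsuf p q (by omega) hpq hq
  | succ k ih =>
    intro a hm Hheap Hsuf Hpart
    rw [sortLoopA]
    set a1 := swapL a (k+1) 0 with ha1
    set a2 := heapifyA a1 (k+1) 0 with ha2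
    have hlen1 : a1.length = a.length := swapL_length a (k+1) 0
    have hlen2 : a2.length = a.length := by rw [ha2, heapifyA_length, hlen1]
    have hK1 : a1.getD (k+1) 0 = a.getD 0 0 :=
      getD_swapL_fst a (k+1) 0 (by omega) (by omega)
    have hK0 : a1.getD 0 0 = a.getD (k+1) 0 :=
      getD_swapL_snd a (k+1) 0 (by omega)
    have ha2top : a2.getD (k+1) 0 = a.getD 0 0 := by
      rw [ha2, heapifyA_frame a1 (k+1) 0 (k+1) (by omega), hK1]
    have hunt : ∀ q, k+2 ≤ q → a2.getD q 0 = a.getD q 0 := by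
      intro q hq
      rw [ha2, heapifyA_frame a1 (k+1) 0 q (by omega), ha1,
        getD_swapL_of_ne a (k+1) 0 q (by omega) (by omega)]
    have rootmax : ∀ p, p < k+2 → a.getD p 0 ≤ a.getD 0 0 :=
      heap_root_max a (k+2) (fun j k' hk' => Hheap j k' hk')
    have Hheap2 : ∀ j k', k' < k+1 → (k' = 2*j+1 ∨ k' = 2*j+2) →
        a2.getD k' 0 ≤ a2.getD j 0 := by
      intro j k' hk' hc
      refine heapifyA_heap a1 (k+1) 0 (by omega) ?_ j k' (Nat.zero_le j) hk' hc
      intro j' k'' hj' hk'' hc'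
      rw [ha1, getD_swapL_of_ne a (k+1) 0 j' (by omega) (by omega),
        getD_swapL_of_ne a (k+1) 0 k'' (by omega) (by omega)]
      exact Hheap j' k'' (by omega) hc'
    have Hsuf2 : ∀ p q, k+1 ≤ p → p ≤ q → q < a2.length → a2.getD p 0 ≤ a2.getD q 0 := by
      intro p q hp hpq hq
      rw [hlen2] at hq
      rcases Nat.eq_or_lt_of_le hp with rfl | hp'
      · rcases Nat.eq_or_lt_of_le hpq with rfl | hq'
        · exact le_refl _
        · rw [ha2top, hunt q (by omega)]
          exact Hpart 0 q (by omega) (by omega) hq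
      · rw [hunt p (by omega), hunt q (by omega)]
        exact Hsuf p q (by omega) hpq hq
    have Hpart2 : ∀ p q, p < k+1 → k+1 ≤ q → q < a2.length → a2.getD p 0 ≤ a2.getD q 0 := by
      intro p q hp hq hql
      rw [hlen2] at hql
      obtain ⟨q', hq', hval⟩ := heapifyA_values a1 (k+1) 0 (by omega) p hp
      have hle0 : a2.getD p 0 ≤ a.getD 0 0 := by
        rw [← ha2] at hval
        rw [hval]
        rcases Nat.eq_zero_or_pos q' with rfl | hq'pos
        · rw [hK0]; exact rootmax (k+1) (by omega)
        · rw [ha1, getD_swapL_of_ne a (k+1) 0 q' (by omega) (by omega)]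
          exact rootmax q' (by omega)
      rcases Nat.eq_or_lt_of_le hq with rfl | hq''
      · rw [ha2top]; exact hle0
      · rw [hunt q (by omega)]
        exact le_trans hle0 (Hpart 0 q (by omega) (by omega) hql)
    have hrec := ih a2 (by omega) Hheap2 Hsuf2 Hpart2
    intro p q hpq hq
    exact hrec p q hpq (by omega)

theorem heapSortA_perm (arr : List Int) : (heapSortA arr).Perm arr := by
  rw [heapSortA]
  rcases Nat.eq_zero_or_pos arr.length with h0 | hpos
  · rw [h0]
    exact (show sortLoopA 0 (buildLoopA 0 1 arr) = buildLoopA 0 1 arr from rfl) ▸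
      buildLoopA_perm 0 1 arr (by omega)
  · refine (sortLoopA_perm _ _ ?_).trans (buildLoopA_perm _ _ arr (le_refl _))
    rw [buildLoopA_length]
    omega

theorem heapSortA_sorted (arr : List Int) :
    ∀ p q, p ≤ q → q < (heapSortA arr).length →
      (heapSortA arr).getD p 0 ≤ (heapSortA arr).getD q 0 := by
  rw [heapSortA]
  rcases Nat.eq_zero_or_pos arr.length with h0 | hpos
  · intro p q hpq hq
    rw [sortLoopA_length, buildLoopA_length, h0] at hq
    omega
  · set n := arr.length with hn
    set B := buildLoopA n (n+1) arr with hB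
    have hBlen : B.length = n := by rw [hB, buildLoopA_length]
    have hBheap : ∀ j k', k' < n → (k' = 2*j+1 ∨ k' = 2*j+2) →
        B.getD k' 0 ≤ B.getD j 0 := by
      refine buildLoopA_heap n (n+1) arr (le_refl _) ?_
      intro j k' hj hk' hc
      omega
    have hsorted := sortLoopA_sorted (n-1) B (by omega)
      (fun j k' hk' hc => hBheap j k' (by omega) hc)
      (fun p q hp hpq hq => by rw [hBlen] at hq; omega)
      (fun p q hp hq hql => by rw [hBlen] at hql; omega)
    intro p q hpq hq
    rw [sortLoopA_length, hBlen] at hq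
    exact hsorted p q hpq (by omega)

theorem heapSortA_eq_sorted (arr : List Int) :
    heapSortA arr = PySem.List.sorted arr (fun x => x) false := by
  refine (PySem.List.sorted_id_eq_of_perm_of_pairwise arr (heapSortA arr)
    (heapSortA_perm arr) ?_).symm
  rw [List.pairwise_iff_getElem]
  intro i j hi hj hij
  have := heapSortA_sorted arr i j (le_of_lt hij) hj
  rwa [List.getD_eq_getElem _ 0 hi, List.getD_eq_getElem _ 0 hj] at this

-- ===== VERDICT (by name: the statement is the Claim_ definition above) =====
theorem tournamentSortMatrix_spec : Claim_equal_tournamentSortMatrix := by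
  intro matrix _
  unfold Spec_tournamentSortMatrix tournamentSortMatrix tournamentSortMatrix_alt
  rw [PySem.List.foldl_append_singleton_eq_map]
  simp only [List.nil_append]
  exact List.map_congr_left (fun row _ => heapSortA_eq_sorted row)
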